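-- pv_equiv track=rewrite | github.com/bitpyc/Finbench | bizbench/data_processor.py | _leading_whitespace_width
-- ===== SOURCE A (Python) =====
-- def _leading_whitespace_width(line: str) -> int:
--     width = 0
--     for ch in line:
--         if ch == " ":
--             width += 1
--         elif ch == "\t":
--             width += 4
--         else:
--             break
--     return width
-- ===== SOURCE B (Python) =====
-- def _leading_whitespace_width(line: str) -> int:
--     stripped = line.lstrip(" \t")
--     prefix = line[:len(line) - len(stripped)]
--     return prefix.count(" ") + 4 * prefix.count("\t")
-- ===== Notes on version B (the rewrite author's own statement) =====
-- stated objective: idiomatic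
-- what changed: Replaces the accumulate-with-branches break loop by finding the leading space/tab prefix boundary with lstrip and then tallying it with two count passes.
import Mathlib
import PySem

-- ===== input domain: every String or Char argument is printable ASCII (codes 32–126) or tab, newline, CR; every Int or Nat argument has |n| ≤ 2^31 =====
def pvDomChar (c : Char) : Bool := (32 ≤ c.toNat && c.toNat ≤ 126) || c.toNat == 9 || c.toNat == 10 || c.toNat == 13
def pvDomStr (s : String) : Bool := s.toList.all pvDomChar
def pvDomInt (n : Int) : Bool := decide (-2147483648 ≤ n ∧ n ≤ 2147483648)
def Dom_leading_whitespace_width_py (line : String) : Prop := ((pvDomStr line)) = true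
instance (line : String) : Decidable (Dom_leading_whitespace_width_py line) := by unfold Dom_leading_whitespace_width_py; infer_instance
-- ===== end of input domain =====

-- B computes the leading ' '/'\t' prefix first (lstrip boundary), then tallies it with two count passes;
-- same return value, different decomposition (find-then-count vs accumulate-with-branches).
-- ===== PORT A =====
-- the for-loop with break: accumulator over the remaining characters
def pvGoA : Int → List Char → Int
  | w, [] => w
  | w, c :: rest =>
    if c = ' ' then pvGoA (w + 1) rest
    else if c = '\t' then pvGoA (w + 4) rest
    else w

def leading_whitespace_width_py (line : String) : Int := pvGoA 0 line.toList

-- ===== PORT B =====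
-- line.lstrip(" \t") = drop leading chars in {' ','\t'} (exact: lstrip(chars) drops while ch in chars)
def leading_whitespace_width_py_alt (line : String) : Int :=
  let cs := line.toList
  let stripped := cs.dropWhile (fun c => c == ' ' || c == '\t')
  let pre := cs.take (cs.length - stripped.length)
  (pre.count ' ' : Int) + 4 * (pre.count '\t' : Int)

-- ===== PRECONDITION & SPEC =====
def Spec_leading_whitespace_width_py (line : String) (out : Int) : Prop := out = leading_whitespace_width_py_alt line
instance (line : String) (out : Int) : Decidable (Spec_leading_whitespace_width_py line out) := by unfold Spec_leading_whitespace_width_py; infer_instance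

-- ===== CLAIM (what is proved, stated in full; the proofs are below) =====
def Claim_equal_leading_whitespace_width_py : Prop := ∀ (line : String), Dom_leading_whitespace_width_py line → Spec_leading_whitespace_width_py line (leading_whitespace_width_py line)

-- ===== LEMMAS AND PROOFS =====

-- ===== VERDICT (by name: the statement is the Claim_ definition above) =====
theorem pvGoA_eq (cs : List Char) (w : Int) :
    pvGoA w cs = w + ((cs.takeWhile (fun c => c == ' ' || c == '\t')).count ' ' : Int)
      + 4 * ((cs.takeWhile (fun c => c == ' ' || c == '\t')).count '\t' : Int) := by
  induction cs generalizing w with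
  | nil => simp [pvGoA]
  | cons c rest ih =>
    by_cases h1 : c = ' '
    · simp [pvGoA, h1, ih]; ring
    · by_cases h2 : c = '\t'
      · simp [pvGoA, h2, ih]; ring
      · simp [pvGoA, h1, h2]

theorem pvTake_eq_takeWhile (cs : List Char) (p : Char → Bool) :
    cs.take (cs.length - (cs.dropWhile p).length) = cs.takeWhile p := by
  have h : (cs.takeWhile p).length + (cs.dropWhile p).length = cs.length := by
    rw [← List.length_append, List.takeWhile_append_dropWhile]
  have h2 : cs.length - (cs.dropWhile p).length = (cs.takeWhile p).length := by omega
  rw [h2]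
  exact (List.prefix_iff_eq_take.1 (List.takeWhile_prefix p)).symm

theorem leading_whitespace_width_py_spec : Claim_equal_leading_whitespace_width_py := by
  intro line _
  unfold Spec_leading_whitespace_width_py leading_whitespace_width_py leading_whitespace_width_py_alt
  simp only [pvTake_eq_takeWhile, pvGoA_eq]
  ring
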